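-- pv_equiv track=rewrite | github.com/junhaz18-zzz/spacetime-crawler4py | validator.py | has_repeating_path_segments
-- ===== SOURCE A (Python) =====
-- def has_repeating_path_segments(path: str) -> bool:
--     segments = [s for s in path.split("/") if s]
--     if len(segments) < 3:
--         return False
--
--     for i in range(len(segments) - 2):
--         if segments[i] == segments[i + 1] == segments[i + 2]:
--             return True
--
--     counts = {}
--     for s in segments:
--         counts[s] = counts.get(s, 0) + 1
--         if counts[s] >= 6:
--             return True
--
--     return False
-- ===== SOURCE B (Python) =====
-- def has_repeating_path_segments(path: str) -> bool:
--     segments = [s for s in path.split("/") if s]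
--     # invert the data: index positions by segment value, one grouping pass
--     positions = {}
--     for i, s in enumerate(segments):
--         positions.setdefault(s, []).append(i)
--     # a triple of equal adjacent segments == some segment occupies three
--     # consecutive positions; a 6-count == some position list has length >= 6
--     for ps in positions.values():
--         if len(ps) >= 6:
--             return True
--         pset = set(ps)
--         if any(j + 1 in pset and j + 2 in pset for j in ps):
--             return True
--     return False
-- ===== Notes on version B (the rewrite author's own statement) =====
-- stated objective: alternative
-- what changed: Instead of a window scan over the segment list followed by an incremental counting loop, B builds one positions-by-segment index in a single grouping pass and decides both conditions per segment from its position list: length >= 6 for the frequency check, and membership of j+1 and j+2 in the position set for the adjacent-triple check (a triple of equal adjacent segments is exactly a segment occupying three consecutive positions); the redundant len<3 guard disappears.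
import Mathlib
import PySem

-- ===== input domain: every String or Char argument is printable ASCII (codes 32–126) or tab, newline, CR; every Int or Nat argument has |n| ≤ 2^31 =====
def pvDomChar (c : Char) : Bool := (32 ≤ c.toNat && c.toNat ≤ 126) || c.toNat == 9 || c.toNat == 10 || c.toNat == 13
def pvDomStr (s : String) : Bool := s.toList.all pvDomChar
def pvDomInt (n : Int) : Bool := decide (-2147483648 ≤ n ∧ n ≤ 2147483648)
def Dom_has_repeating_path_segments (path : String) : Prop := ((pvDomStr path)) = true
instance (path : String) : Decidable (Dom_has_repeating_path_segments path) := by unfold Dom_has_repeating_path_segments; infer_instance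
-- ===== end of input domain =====

-- B replaces A's window scan + incremental counting loop by one grouping pass that indexes
-- positions by segment value, then decides both conditions per segment from its position list
-- (length >= 6; membership of j+1 and j+2 in the position set) — alternative decomposition, same cost.


-- ===== PORT A =====
-- the counts-dict loop with its early return once a count reaches 6
def aCountLoop : List String → PySem.Dict String Int → Bool
  | [], _ => false
  | s :: rest, d =>
    let d' := d.insert s (d.getD s 0 + 1)
    if 6 ≤ d'.getD s 0 then true else aCountLoop rest d'

def has_repeating_path_segments (path : String) : Bool :=
  -- path.split("/") with a non-empty separator always succeeds, hence .getD []
  let segments := ((PySem.Str.split? path "/").getD []).filter (fun s => s ≠ "")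
  if segments.length < 3 then false
  else if (PySem.List.pyRange 0 ((segments.length : Int) - 2) 1).any (fun i =>
      PySem.List.pyGetD segments i "" == PySem.List.pyGetD segments (i + 1) "" &&
      PySem.List.pyGetD segments (i + 1) "" == PySem.List.pyGetD segments (i + 2) "")
  then true
  else aCountLoop segments PySem.Dict.empty

-- ===== PORT B =====
def has_repeating_path_segments_alt (path : String) : Bool :=
  let segments := ((PySem.Str.split? path "/").getD []).filter (fun s => s ≠ "")
  -- for i, s in enumerate(segments): positions.setdefault(s, []).append(i)
  let positions := ((PySem.List.enumerate segments 0).map (fun p => (p.2, p.1))).foldl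
      (fun d p => d.modify p.1 [] (· ++ [p.2])) PySem.Dict.empty
  positions.values.any (fun ps =>
    decide (6 ≤ ps.length) ||
    (let pset := PySem.Set.ofList ps
     ps.any (fun j => pset.contains (j + 1) && pset.contains (j + 2))))

-- ===== PRECONDITION & SPEC =====
def Spec_has_repeating_path_segments (path : String) (out : Bool) : Prop := out = has_repeating_path_segments_alt path
instance (path : String) (out : Bool) : Decidable (Spec_has_repeating_path_segments path out) := by unfold Spec_has_repeating_path_segments; infer_instance

-- ===== CLAIM (what is proved, stated in full; the proofs are below) =====
def Claim_equal_has_repeating_path_segments : Prop := ∀ (path : String), Dom_has_repeating_path_segments path → Spec_has_repeating_path_segments path (has_repeating_path_segments path)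

-- ===== LEMMAS AND PROOFS =====

-- reference predicate: some three consecutive elements are equal
def hasTriple : List String → Bool
  | a :: b :: c :: r => (a == b && b == c) || hasTriple (b :: c :: r)
  | _ => false

theorem hasTriple_iff (xs : List String) :
    hasTriple xs = true ↔ ∃ k, k + 2 < xs.length ∧
      xs.getD k "" = xs.getD (k + 1) "" ∧ xs.getD (k + 1) "" = xs.getD (k + 2) "" := by
  match xs with
  | [] => simp [hasTriple]
  | [a] => simp [hasTriple]
  | [a, b] => simp [hasTriple]
  | a :: b :: c :: r =>
    have ih := hasTriple_iff (b :: c :: r)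
    simp only [hasTriple, Bool.or_eq_true, Bool.and_eq_true, beq_iff_eq, ih]
    constructor
    · rintro (⟨h1, h2⟩ | ⟨k, hk, h1, h2⟩)
      · exact ⟨0, by simp, by simpa using h1, by simpa using h2⟩
      · exact ⟨k + 1, by simpa using hk, by simpa using h1, by simpa using h2⟩
    · rintro ⟨k, hk, h1, h2⟩
      cases k with
      | zero => exact Or.inl ⟨by simpa using h1, by simpa using h2⟩
      | succ j => exact Or.inr ⟨j, by simpa using hk, by simpa using h1, by simpa using h2⟩

theorem aScan_eq_hasTriple (xs : List String) :
    (PySem.List.pyRange 0 ((xs.length : Int) - 2) 1).any (fun i =>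
      PySem.List.pyGetD xs i "" == PySem.List.pyGetD xs (i + 1) "" &&
      PySem.List.pyGetD xs (i + 1) "" == PySem.List.pyGetD xs (i + 2) "") = hasTriple xs := by
  rw [Bool.eq_iff_iff, List.any_eq_true, hasTriple_iff]
  constructor
  · rintro ⟨i, hi, hp⟩
    rw [PySem.List.mem_pyRange_one] at hi
    obtain ⟨h0, h2⟩ := hi
    lift i to ℕ using h0 with k
    have e1 : ((k : Int) + 1) = ((k + 1 : ℕ) : Int) := by push_cast; ring
    have e2 : ((k : Int) + 2) = ((k + 2 : ℕ) : Int) := by push_cast; ring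
    rw [e1, e2] at hp
    simp only [PySem.List.pyGetD_natCast, Bool.and_eq_true, beq_iff_eq] at hp
    exact ⟨k, by omega, hp.1, hp.2⟩
  · rintro ⟨k, hk, h1, h2⟩
    refine ⟨(k : Int), ?_, ?_⟩
    · rw [PySem.List.mem_pyRange_one]; omega
    · have e1 : ((k : Int) + 1) = ((k + 1 : ℕ) : Int) := by push_cast; ring
      have e2 : ((k : Int) + 2) = ((k + 2 : ℕ) : Int) := by push_cast; ring
      simp only [e1, e2, PySem.List.pyGetD_natCast, Bool.and_eq_true, beq_iff_eq]
      exact ⟨h1, h2⟩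

theorem aCountLoop_iff (xs : List String) : ∀ (d : PySem.Dict String Int),
    aCountLoop xs d = true ↔ ∃ s ∈ xs, 6 ≤ d.getD s 0 + (xs.count s : Int) := by
  induction xs with
  | nil => intro d; simp [aCountLoop]
  | cons x xs ih =>
    intro d
    simp only [aCountLoop, PySem.Dict.getD_insert_self]
    by_cases h6 : 6 ≤ d.getD x 0 + 1
    · simp only [h6, if_true, true_iff]
      refine ⟨x, List.mem_cons_self, ?_⟩
      have : (x :: xs).count x = xs.count x + 1 := by simp
      rw [this]
      have : (0:Int) ≤ (xs.count x : Int) := by positivity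
      push_cast
      omega
    · simp only [h6, if_false, ih]
      constructor
      · rintro ⟨s, hs, hv⟩
        by_cases hsx : s = x
        · subst hsx
          refine ⟨s, List.mem_cons_self, ?_⟩
          rw [PySem.Dict.getD_insert_self] at hv
          have : (s :: xs).count s = xs.count s + 1 := by simp
          rw [this]; push_cast; omega
        · refine ⟨s, List.mem_cons_of_mem _ hs, ?_⟩
          rw [PySem.Dict.getD_insert, if_neg hsx] at hv
          have : (x :: xs).count s = xs.count s := by
            rw [List.count_cons]; simp [Ne.symm hsx]
          rw [this]; exact hv
      · rintro ⟨s, hs, hv⟩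
        rcases List.mem_cons.1 hs with hsx | hsm
        · subst hsx
          by_cases hmem : s ∈ xs
          · refine ⟨s, hmem, ?_⟩
            rw [PySem.Dict.getD_insert_self]
            have : (s :: xs).count s = xs.count s + 1 := by simp
            rw [this] at hv; push_cast at hv ⊢; omega
          · exfalso
            have hc : xs.count s = 0 := List.count_eq_zero.2 hmem
            have : (s :: xs).count s = xs.count s + 1 := by simp
            rw [this, hc] at hv
            push_cast at hv
            omega
        · by_cases hsx : s = x
          · subst hsx
            refine ⟨s, hsm, ?_⟩
            rw [PySem.Dict.getD_insert_self]
            have : (s :: xs).count s = xs.count s + 1 := by simp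
            rw [this] at hv; push_cast at hv ⊢; omega
          · refine ⟨s, hsm, ?_⟩
            rw [PySem.Dict.getD_insert, if_neg hsx]
            have : (x :: xs).count s = xs.count s := by
              rw [List.count_cons]; simp [Ne.symm hsx]
            rw [this] at hv; exact hv

-- the dict B builds over xs
def bDict (xs : List String) : PySem.Dict String (List Int) :=
  ((PySem.List.enumerate xs 0).map (fun p => (p.2, p.1))).foldl
    (fun d p => d.modify p.1 [] (· ++ [p.2])) PySem.Dict.empty

theorem bDict_getD (xs : List String) (s : String) :
    (bDict xs).getD s [] = ((PySem.List.enumerate xs 0).filter (fun p => p.2 == s)).map (·.1) := by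
  unfold bDict
  rw [PySem.Dict.getD_foldl_modify_append]
  simp [List.filter_map, List.map_map, Function.comp_def]

theorem bDict_keys (xs : List String) : (bDict xs).keys = PySem.Set.ofList xs := by
  unfold bDict
  rw [PySem.Dict.keys_foldl_modify_key]
  rw [List.map_map]
  have : (Prod.fst ∘ fun p : Int × String => (p.2, p.1)) = (fun p : Int × String => p.2) := rfl
  rw [this, PySem.List.map_snd_enumerate]
  rfl

theorem bDict_nodup (xs : List String) : (bDict xs).keys.Nodup := by
  rw [bDict_keys]; exact PySem.Set.nodup_ofList xs

theorem values_any_iff {ν : Type} (d : PySem.Dict String ν) (dflt : ν) (p : ν → Bool)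
    (h : d.keys.Nodup) :
    d.values.any p = true ↔ ∃ k ∈ d.keys, p (d.getD k dflt) = true := by
  constructor
  · intro hv
    rw [List.any_eq_true] at hv
    obtain ⟨v, hvm, hp⟩ := hv
    obtain ⟨⟨k, v'⟩, hkm, he⟩ := List.mem_map.1 hvm
    cases he
    refine ⟨k, by simpa using PySem.Dict.mem_keys_of_mem_items _ hkm, ?_⟩
    rw [PySem.Dict.getD_of_mem_items _ hkm h]
    exact hp
  · rintro ⟨k, hk, hp⟩
    rw [List.any_eq_true]
    have hc : d.contains k = true := (PySem.Dict.contains_iff_mem_keys d k).2 hk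
    rw [PySem.Dict.contains_eq_isSome_get?] at hc
    obtain ⟨v, hv⟩ := Option.isSome_iff_exists.1 hc
    refine ⟨v, List.mem_map.2 ⟨(k, v), PySem.Dict.mem_items_of_get?_eq_some _ hv, rfl⟩, ?_⟩
    rw [PySem.Dict.getD_eq_get?_getD, hv] at hp
    simpa using hp

theorem mem_bpos (xs : List String) (s : String) (j : Int) :
    j ∈ ((PySem.List.enumerate xs 0).filter (fun p => p.2 == s)).map (·.1) ↔
      ∃ k : ℕ, k < xs.length ∧ xs.getD k "" = s ∧ j = (k : Int) := by
  simp only [List.mem_map, List.mem_filter, PySem.List.mem_enumerate_iff]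
  constructor
  · rintro ⟨⟨i, x⟩, ⟨⟨k, hk, he⟩, hx⟩, hj⟩
    cases he
    refine ⟨k, hk, ?_, by simpa using hj.symm⟩
    simp only [beq_iff_eq] at hx
    rw [List.getD_eq_getElem _ _ hk]; exact hx
  · rintro ⟨k, hk, hs, hj⟩
    refine ⟨((k : Int), xs[k]), ⟨⟨k, hk, by simp⟩, ?_⟩, by simpa using hj.symm⟩
    simp only [beq_iff_eq]
    rw [List.getD_eq_getElem _ _ hk] at hs; exact hs

theorem len_bpos (xs : List String) (s : String) :
    (((PySem.List.enumerate xs 0).filter (fun p => p.2 == s)).map (·.1)).length = xs.count s := by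
  rw [List.length_map, ← List.countP_eq_length_filter]
  have : xs.count s = ((PySem.List.enumerate xs 0).map (·.2)).count s := by
    rw [PySem.List.map_snd_enumerate]
  rw [this, List.count_eq_countP, List.countP_map]
  rfl

-- B over a fixed segment list, as a proposition
theorem alt_iff (xs : List String) :
    ((bDict xs).values.any (fun ps =>
      decide (6 ≤ ps.length) ||
      (let pset := PySem.Set.ofList ps
       ps.any (fun j => pset.contains (j + 1) && pset.contains (j + 2)))) = true) ↔
    ((∃ s ∈ xs, 6 ≤ xs.count s) ∨ ∃ k, k + 2 < xs.length ∧
      xs.getD k "" = xs.getD (k + 1) "" ∧ xs.getD (k + 1) "" = xs.getD (k + 2) "") := by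
  rw [values_any_iff _ [] _ (bDict_nodup xs)]
  simp only [bDict_keys, bDict_getD, PySem.Set.mem_ofList]
  constructor
  · rintro ⟨s, hs, hp⟩
    simp only [Bool.or_eq_true, decide_eq_true_eq, List.any_eq_true, Bool.and_eq_true,
      PySem.Set.contains_iff, PySem.Set.mem_ofList, len_bpos, mem_bpos] at hp
    rcases hp with h6 | ⟨j, ⟨k, hk, hks, hj⟩, ⟨k1, hk1, hk1s, hj1⟩, ⟨k2, hk2, hk2s, hj2⟩⟩
    · exact Or.inl ⟨s, hs, h6⟩
    · have e1 : k1 = k + 1 := by omega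
      have e2 : k2 = k + 2 := by omega
      subst e1; subst e2; subst hj
      exact Or.inr ⟨k, hk2, by rw [hks, hk1s], by rw [hk1s, hk2s]⟩
  · rintro (⟨s, hs, h6⟩ | ⟨k, hk, h1, h2⟩)
    · refine ⟨s, hs, ?_⟩
      simp only [Bool.or_eq_true, decide_eq_true_eq, len_bpos]
      exact Or.inl h6
    · have hkl : k < xs.length := by omega
      have hmem : xs.getD k "" ∈ xs := by
        rw [List.getD_eq_getElem _ _ hkl]; exact List.getElem_mem hkl
      refine ⟨xs.getD k "", hmem, ?_⟩
      simp only [Bool.or_eq_true, decide_eq_true_eq, List.any_eq_true, Bool.and_eq_true,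
        PySem.Set.contains_iff, PySem.Set.mem_ofList, mem_bpos]
      refine Or.inr ⟨(k : Int), ⟨k, hkl, rfl, rfl⟩, ⟨k + 1, by omega, h1.symm, by push_cast; ring⟩,
        ⟨k + 2, by omega, (h1.trans h2).symm, by push_cast; ring⟩⟩

-- ===== VERDICT (by name: the statement is the Claim_ definition above) =====
theorem main_iff (xs : List String) :
    (if xs.length < 3 then false
     else if (PySem.List.pyRange 0 ((xs.length : Int) - 2) 1).any (fun i =>
         PySem.List.pyGetD xs i "" == PySem.List.pyGetD xs (i + 1) "" &&
         PySem.List.pyGetD xs (i + 1) "" == PySem.List.pyGetD xs (i + 2) "")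
     then true
     else aCountLoop xs PySem.Dict.empty) =
    ((bDict xs).values.any (fun ps =>
      decide (6 ≤ ps.length) ||
      (let pset := PySem.Set.ofList ps
       ps.any (fun j => pset.contains (j + 1) && pset.contains (j + 2))))) := by
  rw [Bool.eq_iff_iff, alt_iff]
  constructor
  · intro hA
    by_cases hlen : xs.length < 3
    · simp [hlen] at hA
    · rw [if_neg hlen] at hA
      by_cases hscan : (PySem.List.pyRange 0 ((xs.length : Int) - 2) 1).any (fun i =>
          PySem.List.pyGetD xs i "" == PySem.List.pyGetD xs (i + 1) "" &&
          PySem.List.pyGetD xs (i + 1) "" == PySem.List.pyGetD xs (i + 2) "") = true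
      · rw [aScan_eq_hasTriple, hasTriple_iff] at hscan
        exact Or.inr hscan
      · rw [if_neg hscan, aCountLoop_iff] at hA
        obtain ⟨s, hs, hv⟩ := hA
        rw [PySem.Dict.getD_empty, zero_add] at hv
        exact Or.inl ⟨s, hs, by exact_mod_cast hv⟩
  · intro hB
    have hlen : ¬ (xs.length < 3) := by
      rcases hB with ⟨s, hs, h6⟩ | ⟨k, hk, _⟩
      · have := List.count_le_length (l := xs) (a := s)
        omega
      · omega
    rw [if_neg hlen]
    by_cases hscan : (PySem.List.pyRange 0 ((xs.length : Int) - 2) 1).any (fun i =>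
        PySem.List.pyGetD xs i "" == PySem.List.pyGetD xs (i + 1) "" &&
        PySem.List.pyGetD xs (i + 1) "" == PySem.List.pyGetD xs (i + 2) "") = true
    · simp [hscan]
    · rw [if_neg hscan]
      rcases hB with ⟨s, hs, h6⟩ | htrip
      · rw [aCountLoop_iff]
        exact ⟨s, hs, by rw [PySem.Dict.getD_empty, zero_add]; exact_mod_cast h6⟩
      · exfalso
        rw [aScan_eq_hasTriple, hasTriple_iff] at hscan
        exact hscan htrip

theorem has_repeating_path_segments_spec : Claim_equal_has_repeating_path_segments := by
  intro path _
  unfold Spec_has_repeating_path_segments has_repeating_path_segments has_repeating_path_segments_alt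
  exact main_iff (((PySem.Str.split? path "/").getD []).filter (fun s => s ≠ ""))
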